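-- pv_equiv track=rewrite | github.com/Siasor88/Embedded-Codes | Hw2.py | get_state_binary_bit
-- ===== SOURCE A (Python) =====
-- def get_state_binary_bit(state: int, n: int):
--     if n < state: raise Exception('Invalid Input')
--     res = str(n) + '\'b'
--     for i in range(1, n + 1):
--         if i == n - state + 1:
--             res += '1'
--         else:
--             res += '0'
--     return res
-- ===== SOURCE B (Python) =====
-- def get_state_binary_bit(state: int, n: int):
--     if n < state: raise Exception('Invalid Input')
--     idx = n - state
--     if 0 <= idx < n:
--         tail = '0' * idx + '1' + '0' * (n - idx - 1)
--     else:
--         tail = '0' * n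
--     return str(n) + "'b" + tail
-- ===== Notes on version B (the rewrite author's own statement) =====
-- stated objective: faster
-- what changed: B replaces the per-character loop over range(1, n+1) with a closed-form assembly: it computes the set-bit index idx = n - state and builds the tail as '0'*idx + '1' + '0'*(n-idx-1) (or '0'*n when state <= 0), avoiding quadratic string concatenation.
import Mathlib
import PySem

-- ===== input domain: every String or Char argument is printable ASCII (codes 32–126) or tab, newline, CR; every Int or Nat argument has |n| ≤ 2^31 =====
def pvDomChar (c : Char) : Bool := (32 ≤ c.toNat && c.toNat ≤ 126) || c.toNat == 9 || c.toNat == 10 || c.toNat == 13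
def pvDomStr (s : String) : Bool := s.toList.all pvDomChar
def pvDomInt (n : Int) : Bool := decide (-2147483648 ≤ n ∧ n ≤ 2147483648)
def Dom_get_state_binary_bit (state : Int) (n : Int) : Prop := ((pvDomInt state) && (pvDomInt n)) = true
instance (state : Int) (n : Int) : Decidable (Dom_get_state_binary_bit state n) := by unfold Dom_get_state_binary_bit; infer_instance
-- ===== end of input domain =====

-- B builds the tail in closed form ('0'*idx + '1' + '0'*rest) instead of A's per-character loop.
-- Both raise on n < state (excluded by Pre_); equivalence is about the return value on state ≤ n.

-- ===== PORT A =====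
-- res += c on strings, ported over List Char; str(n) is PySem.Int.toStr
def get_state_binary_bit (state : Int) (n : Int) : String :=
  -- 'if n < state: raise' is excluded by Pre_get_state_binary_bit
  let init : List Char := (PySem.Int.toStr n).toList ++ ['\'', 'b']
  String.ofList ((PySem.List.pyRange 1 (n + 1) 1).foldl
    (fun acc i => if i = n - state + 1 then acc ++ ['1'] else acc ++ ['0']) init)

-- ===== PORT B =====
-- '0' * k is List.replicate k.toNat '0' (Python repetition by a negative count gives '')
def get_state_binary_bit_alt (state : Int) (n : Int) : String :=
  let idx := n - state
  let tail : List Char :=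
    if 0 ≤ idx ∧ idx < n then
      List.replicate idx.toNat '0' ++ ['1'] ++ List.replicate (n - idx - 1).toNat '0'
    else
      List.replicate n.toNat '0'
  String.ofList ((PySem.Int.toStr n).toList ++ ['\'', 'b'] ++ tail)

-- ===== PRECONDITION & SPEC =====
-- A raises Exception('Invalid Input') when n < state; those inputs are excluded.
def Pre_get_state_binary_bit (state : Int) (n : Int) : Prop := state ≤ n
instance (state : Int) (n : Int) : Decidable (Pre_get_state_binary_bit state n) := by
  unfold Pre_get_state_binary_bit; infer_instance
def pvWitness_get_state_binary_bit : Int × Int := (3, 5)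
def Spec_get_state_binary_bit (state : Int) (n : Int) (out : String) : Prop := out = get_state_binary_bit_alt state n
instance (state : Int) (n : Int) (out : String) : Decidable (Spec_get_state_binary_bit state n out) := by unfold Spec_get_state_binary_bit; infer_instance

-- ===== CLAIM (what is proved, stated in full; the proofs are below) =====
def Claim_equal_get_state_binary_bit : Prop := ∀ (state : Int) (n : Int), Dom_get_state_binary_bit state n → Pre_get_state_binary_bit state n → Spec_get_state_binary_bit state n (get_state_binary_bit state n)

-- ===== LEMMAS AND PROOFS =====

-- the loop appends one char per i; rewrite it as a map over the range
theorem loop_eq_map (state n : Int) (init : List Char) :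
    (PySem.List.pyRange 1 (n + 1) 1).foldl
      (fun acc i => if i = n - state + 1 then acc ++ ['1'] else acc ++ ['0']) init
    = init ++ (PySem.List.pyRange 1 (n + 1) 1).map
        (fun i => if i = n - state + 1 then '1' else '0') := by
  have h : (fun (acc : List Char) (i : Int) =>
      if i = n - state + 1 then acc ++ ['1'] else acc ++ ['0'])
      = fun acc i => acc ++ [if i = n - state + 1 then '1' else '0'] := by
    funext acc i; split_ifs <;> rfl
  rw [h, PySem.List.foldl_append_singleton_eq_map]

-- closed-form shape of the 0/1 map over range
theorem map_ite_range (a b : Nat) :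
    (List.range (a + 1 + b)).map (fun k => if k = a then ('1' : Char) else '0')
    = List.replicate a '0' ++ ['1'] ++ List.replicate b '0' := by
  apply List.ext_getElem
  · simp; omega
  · intro i h1 h2
    simp only [List.getElem_map, List.getElem_range, List.getElem_append,
      List.getElem_replicate, List.length_replicate, List.length_append,
      List.length_cons, List.length_nil, List.getElem_cons]
    split_ifs <;> simp_all <;> omega

theorem get_state_binary_bit_spec : Claim_equal_get_state_binary_bit := by
  intro state n _ hpre
  unfold Pre_get_state_binary_bit at hpre
  unfold Spec_get_state_binary_bit get_state_binary_bit get_state_binary_bit_alt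
  simp only []
  rw [loop_eq_map]
  have key : (PySem.List.pyRange 1 (n + 1) 1).map
      (fun i => if i = n - state + 1 then ('1' : Char) else '0')
      = (if 0 ≤ n - state ∧ n - state < n then
          List.replicate (n - state).toNat '0' ++ ['1'] ++ List.replicate (n - (n - state) - 1).toNat '0'
        else List.replicate n.toNat '0') := by
    rw [PySem.List.pyRange_one]
    have hsub : (n + 1 - 1).toNat = n.toNat := by omega
    rw [hsub, List.map_map]
    have hfun : ((fun i : Int => if i = n - state + 1 then ('1' : Char) else '0') ∘
        (fun k : Nat => 1 + (k : Int)))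
        = fun k : Nat => if k = (n - state).toNat ∧ 0 ≤ n - state then ('1' : Char) else '0' := by
      funext k
      simp only [Function.comp]
      congr 1
      simp only [eq_iff_iff]
      omega
    rw [hfun]
    by_cases hc : 0 ≤ n - state ∧ n - state < n
    · rw [if_pos hc]
      obtain ⟨h0, h1⟩ := hc
      have hn' : n.toNat = (n - state).toNat + 1 + (n - (n - state) - 1).toNat := by omega
      rw [hn']
      have hfun2 : (fun k : Nat => if k = (n - state).toNat ∧ 0 ≤ n - state then ('1' : Char) else '0')
          = fun k : Nat => if k = (n - state).toNat then ('1' : Char) else '0' := by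
        funext k; congr 1; simp only [eq_iff_iff]; omega
      rw [hfun2]
      exact map_ite_range _ _
    · rw [if_neg hc]
      have hall : ∀ k ∈ List.range n.toNat,
          (fun k : Nat => if k = (n - state).toNat ∧ 0 ≤ n - state then ('1' : Char) else '0') k = '0' := by
        intro k hk
        simp only [List.mem_range] at hk
        show (if k = (n - state).toNat ∧ 0 ≤ n - state then ('1' : Char) else '0') = '0'
        rw [if_neg]
        intro ⟨hk1, hk2⟩
        exact hc ⟨hk2, by omega⟩
      rw [List.map_congr_left hall]
      simp
  rw [key]
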